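-- pv_equiv track=rewrite | github.com/isaacwach234/isaacwach234.github.io | scripts/build_tag_catalog.py | map_canonical_categories
-- ===== SOURCE A (Python) =====
-- from typing import Dict, Iterable, List, Optional
--
-- CANONICAL_CATEGORY_MAP = {
--     "danbooru:artist": "Artists",
--     "danbooru:character": "Characters",
--     "danbooru:meta": "Style & Meta",
--     "danbooru:copyright": "Subject & Creatures",
--     "danbooru:general": None,
-- }
--
-- def map_canonical_categories(hints: Iterable[str]) -> List[str]:
--     categories = []
--     for hint in hints:
--         mapped = CANONICAL_CATEGORY_MAP.get(hint)
--         if mapped is None: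
--             continue
--         categories.append(mapped)
--     return sorted(set(categories))
-- ===== SOURCE B (Python) =====
-- CANONICAL_CATEGORY_MAP = {
--     "danbooru:artist": "Artists",
--     "danbooru:character": "Characters",
--     "danbooru:meta": "Style & Meta",
--     "danbooru:copyright": "Subject & Creatures",
--     "danbooru:general": None,
-- }
--
-- # The non-None entries of CANONICAL_CATEGORY_MAP as (value, key) pairs, listed
-- # in ascending order of value, so no sorting is needed at call time.
-- _BY_VALUE = (
--     ("Artists", "danbooru:artist"),
--     ("Characters", "danbooru:character"),
--     ("Style & Meta", "danbooru:meta"),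
--     ("Subject & Creatures", "danbooru:copyright"),
-- )
--
-- def map_canonical_categories(hints):
--     present = set(hints)
--     return [value for value, key in _BY_VALUE if key in present]
-- ===== Notes on version B (the rewrite author's own statement) =====
-- stated objective: alternative
-- what changed: B drives the loop over a precomputed value-ordered table of the map's non-None (value, key) pairs instead of scanning the hints: it builds a set of the hints once and emits each table value whose key is present, so matches come out already deduplicated and in sorted order with no sort or output set at call time.
import Mathlib
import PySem

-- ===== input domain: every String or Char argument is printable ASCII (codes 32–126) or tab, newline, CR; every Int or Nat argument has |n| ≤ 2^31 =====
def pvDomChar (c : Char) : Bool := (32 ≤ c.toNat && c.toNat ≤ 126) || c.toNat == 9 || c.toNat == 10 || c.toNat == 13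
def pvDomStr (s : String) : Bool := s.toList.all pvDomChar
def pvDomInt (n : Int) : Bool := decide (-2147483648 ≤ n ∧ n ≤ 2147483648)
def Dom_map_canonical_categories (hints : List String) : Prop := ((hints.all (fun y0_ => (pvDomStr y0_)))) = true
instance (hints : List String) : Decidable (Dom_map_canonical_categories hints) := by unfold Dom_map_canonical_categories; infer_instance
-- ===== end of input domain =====

-- B replaces A's scan-hints-then-sort-a-set with a precomputed value-ordered table of the
-- map's non-None entries, emitting matches directly in sorted order (no sort at call time).

-- ===== PORT A =====
-- module-level dict CANONICAL_CATEGORY_MAP (values Optional[str])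
def pvCMAP : PySem.Dict String (Option String) :=
  PySem.Dict.mk
    [("danbooru:artist", some "Artists"),
     ("danbooru:character", some "Characters"),
     ("danbooru:meta", some "Style & Meta"),
     ("danbooru:copyright", some "Subject & Creatures"),
     ("danbooru:general", none)]

def map_canonical_categories (hints : List String) : List String :=
  -- categories = []; for hint in hints: mapped = MAP.get(hint); if mapped is None: continue; categories.append(mapped)
  let categories : List String :=
    hints.foldl (fun acc hint =>
      match pvCMAP.getD hint none with
      | none => acc
      | some v => acc ++ [v]) []
  -- return sorted(set(categories))
  PySem.List.sorted (PySem.Set.ofList categories) (fun x => x) false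

-- ===== PORT B =====
-- _BY_VALUE: the non-None (value, key) pairs, in ascending order of value
def pvByValue : List (String × String) :=
  [("Artists", "danbooru:artist"),
   ("Characters", "danbooru:character"),
   ("Style & Meta", "danbooru:meta"),
   ("Subject & Creatures", "danbooru:copyright")]

def map_canonical_categories_alt (hints : List String) : List String :=
  -- present = set(hints)
  let present : PySem.Set String := PySem.Set.ofList hints
  -- return [value for value, key in _BY_VALUE if key in present]
  pvByValue.filterMap (fun vk =>
    if PySem.Set.contains present vk.2 then some vk.1 else none)

-- ===== PRECONDITION & SPEC =====
def Spec_map_canonical_categories (hints : List String) (out : List String) : Prop := out = map_canonical_categories_alt hints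
instance (hints : List String) (out : List String) : Decidable (Spec_map_canonical_categories hints out) := by unfold Spec_map_canonical_categories; infer_instance

-- ===== CLAIM (what is proved, stated in full; the proofs are below) =====
def Claim_equal_map_canonical_categories : Prop := ∀ (hints : List String), Dom_map_canonical_categories hints → Spec_map_canonical_categories hints (map_canonical_categories hints)

-- ===== LEMMAS AND PROOFS =====

-- A's dict lookup on the literal map, characterised
theorem pvLookup_eq (h x : String) :
    pvCMAP.getD h none = some x ↔
      (h = "danbooru:artist" ∧ x = "Artists") ∨
      (h = "danbooru:character" ∧ x = "Characters") ∨
      (h = "danbooru:meta" ∧ x = "Style & Meta") ∨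
      (h = "danbooru:copyright" ∧ x = "Subject & Creatures") := by
  simp only [pvCMAP, PySem.Dict.getD_eq_get?_getD, PySem.Dict.get?_mk_cons,
    beq_iff_eq]
  split_ifs with h1 h2 h3 h4 h5
  · subst h1; simp [@eq_comm String x]
  · subst h2; simp [@eq_comm String x]
  · subst h3; simp [@eq_comm String x]
  · subst h4; simp [@eq_comm String x]
  · subst h5; simp
  · simp [PySem.Dict.get?, Ne.symm h1, Ne.symm h2, Ne.symm h3, Ne.symm h4]

-- membership in A's accumulated list of mapped categories
theorem pvMemA (hints : List String) (acc : List String) (x : String) :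
    x ∈ hints.foldl (fun acc hint =>
      match pvCMAP.getD hint none with
      | none => acc
      | some v => acc ++ [v]) acc ↔
      x ∈ acc ∨ ∃ h ∈ hints, pvCMAP.getD h none = some x := by
  induction hints generalizing acc with
  | nil => simp
  | cons hd tl ih =>
    rw [List.foldl_cons, ih]
    cases hval : pvCMAP.getD hd none with
    | none => simp [hval]
    | some v => simp [hval]; tauto

-- the same characterisation of A's existential, by the literal map
theorem pvExistsA (hints : List String) (x : String) :
    (∃ h ∈ hints, pvCMAP.getD h none = some x) ↔
      ("danbooru:artist" ∈ hints ∧ x = "Artists") ∨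
      ("danbooru:character" ∈ hints ∧ x = "Characters") ∨
      ("danbooru:meta" ∈ hints ∧ x = "Style & Meta") ∨
      ("danbooru:copyright" ∈ hints ∧ x = "Subject & Creatures") := by
  constructor
  · rintro ⟨h, hm, he⟩
    rcases (pvLookup_eq h x).mp he with ⟨rfl, rfl⟩ | ⟨rfl, rfl⟩ | ⟨rfl, rfl⟩ | ⟨rfl, rfl⟩ <;> tauto
  · rintro (⟨hm, rfl⟩ | ⟨hm, rfl⟩ | ⟨hm, rfl⟩ | ⟨hm, rfl⟩) <;>
      exact ⟨_, hm, (pvLookup_eq _ _).mpr (by tauto)⟩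

-- ===== VERDICT (by name: the statement is the Claim_ definition above) =====
theorem map_canonical_categories_spec : Claim_equal_map_canonical_categories := by
  intro hints _
  show _ = _
  unfold map_canonical_categories map_canonical_categories_alt
  apply PySem.List.sorted_eq_of_perm_of_pairwise_lt (key := fun x => x)
  · -- B's output list is a permutation of set(categories): same members, both Nodup
    rw [List.perm_ext_iff_of_nodup ?_ (PySem.Set.nodup_ofList _)]
    · intro x
      rw [PySem.Set.mem_ofList, pvMemA, pvExistsA]
      simp only [pvByValue, List.mem_filterMap, PySem.Set.contains_iff,
        PySem.Set.mem_ofList, List.not_mem_nil, false_or]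
      constructor
      · rintro ⟨⟨v, k⟩, hvk, hif⟩
        fin_cases hvk <;> simp_all
      · rintro (⟨hm, rfl⟩ | ⟨hm, rfl⟩ | ⟨hm, rfl⟩ | ⟨hm, rfl⟩) <;> simp [hm]
    · -- B's output is Nodup: a sublist-like filterMap of the duplicate-free literal table
      by_cases h1 : "danbooru:artist" ∈ hints <;>
      by_cases h2 : "danbooru:character" ∈ hints <;>
      by_cases h3 : "danbooru:meta" ∈ hints <;>
      by_cases h4 : "danbooru:copyright" ∈ hints <;>
        simp [pvByValue, PySem.Set.mem_ofList, h1, h2, h3, h4]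
  · -- B's output is strictly increasing: the table is listed in ascending value order
    by_cases h1 : "danbooru:artist" ∈ hints <;>
    by_cases h2 : "danbooru:character" ∈ hints <;>
    by_cases h3 : "danbooru:meta" ∈ hints <;>
    by_cases h4 : "danbooru:copyright" ∈ hints <;>
      simp [pvByValue, PySem.Set.mem_ofList, h1, h2, h3, h4] <;>
      decide
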